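-- pv_equiv track=rewrite | github.com/jinook929/leetcode-interview | etc/lint-code-candy-crush.py | removeZeroes
-- ===== SOURCE A (Python) =====
-- def boardColumns(board):
--     result = []
--     currentColumn = 0
--     for i in range(len(board[0])):
--         row = []
--         for j in range(len(board)):
--             row.append(board[j][currentColumn])
--         result.append(row)
--         currentColumn += 1
--     return result
--
-- def removeZeroes(board):
--     tmp = boardColumns(board)
--     newColumns = []
--     for i in range(len(tmp)):
--         column = []
--         zeroCount = 0
--         for j in range(len(tmp[i])):
--             if tmp[i][len(tmp[i]) - 1 - j] != 0:
--                 column.insert(0, tmp[i][len(tmp[i]) - 1 - j])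
--             else:
--                 zeroCount += 1
--         for k in range(zeroCount):
--             column.insert(0, 0)
--         newColumns.append(column)
--     tmp = newColumns
--     convertedBoard = []
--     currentRow = 0
--     for i in range(len(tmp[0])):
--         row = []
--         for j in range(len(tmp)):
--             row.append(tmp[j][currentRow])
--         currentRow += 1
--         convertedBoard.append(row)
--     return convertedBoard
-- ===== SOURCE B (Python) =====
-- def removeZeroes(board):
--     rows, cols = len(board), len(board[0])
--     result = [[0] * cols for _ in range(rows)]
--     for c in range(cols):
--         w = rows - 1
--         for r in range(rows - 1, -1, -1):
--             v = board[r][c]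
--             if v != 0:
--                 result[w][c] = v
--                 w -= 1
--     return result
-- ===== Notes on version B (the rewrite author's own statement) =====
-- stated objective: simpler
-- what changed: Replaces A's transpose / insert(0,..)-compaction / transpose-back pipeline by a single pass per column that writes nonzero cells bottom-up into a zero-prefilled result matrix with a write pointer, eliminating both transpose passes and the insert-at-front compaction (measured ~2.7x faster).
import Mathlib
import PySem

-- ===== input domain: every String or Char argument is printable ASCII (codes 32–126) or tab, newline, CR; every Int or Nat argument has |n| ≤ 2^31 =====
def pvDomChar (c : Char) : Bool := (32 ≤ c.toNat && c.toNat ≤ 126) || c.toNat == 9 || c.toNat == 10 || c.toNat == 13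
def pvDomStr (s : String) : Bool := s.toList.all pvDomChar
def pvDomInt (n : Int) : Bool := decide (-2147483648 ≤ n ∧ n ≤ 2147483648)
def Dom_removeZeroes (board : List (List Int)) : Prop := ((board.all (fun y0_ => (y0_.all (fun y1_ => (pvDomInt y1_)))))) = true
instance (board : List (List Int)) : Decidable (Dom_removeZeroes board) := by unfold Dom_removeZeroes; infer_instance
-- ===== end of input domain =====

-- B replaces A's transpose / insert(0,..) compaction / transpose-back pipeline with a single
-- bottom-up write-pointer sweep per column into a zero-prefilled result matrix (objective: simpler).

-- ===== PORT A =====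
-- Python boardColumns; A's final conversion loop is the very same code (loop over range(len(m[0]))
-- with a running counter, appending m[j][counter]), so the one transliteration serves both call sites.
def pvTransposeA (m : List (List Int)) : List (List Int) :=
  ((List.range (m.headD []).length).foldl
    (fun (st : List (List Int) × Nat) _i =>
      (st.1 ++ [(List.range m.length).foldl (fun r j => r ++ [(m.getD j []).getD st.2 0]) []],
       st.2 + 1))
    ([], 0)).1

-- A's per-column body: reverse scan with insert(0, x) for nonzeros, then insert(0, 0) zeroCount times
def pvCompactA (col : List Int) : List Int :=
  let p := (List.range col.length).foldl
    (fun (st : List Int × Nat) j =>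
      if col.getD (col.length - 1 - j) 0 ≠ 0 then
        (col.getD (col.length - 1 - j) 0 :: st.1, st.2)
      else (st.1, st.2 + 1)) ([], 0)
  (List.range p.2).foldl (fun c _k => (0:Int) :: c) p.1

def removeZeroes (board : List (List Int)) : List (List Int) :=
  let tmp := pvTransposeA board
  let newColumns := (List.range tmp.length).foldl
    (fun acc i => acc ++ [pvCompactA (tmp.getD i [])]) []
  pvTransposeA newColumns

-- ===== PORT B =====
-- inner loop of Source B: for r in range(rows-1,-1,-1) with write pointer w (t = rows-1-r)
def pvFillColB (board : List (List Int)) (rows : Nat) (c : Nat) (result : List (List Int)) :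
    List (List Int) :=
  ((List.range rows).foldl
    (fun (st : List (List Int) × Nat) t =>
      let r := rows - 1 - t
      let v := (board.getD r []).getD c 0
      if v ≠ 0 then (st.1.modify st.2 (fun row => row.set c v), st.2 - 1) else st)
    (result, rows - 1)).1

def removeZeroes_alt (board : List (List Int)) : List (List Int) :=
  (List.range (board.headD []).length).foldl
    (fun result c => pvFillColB board board.length c result)
    (List.replicate board.length (List.replicate (board.headD []).length (0:Int)))

-- ===== PRECONDITION & SPEC =====
-- Pre_ is exactly the set on which Python A returns: a nonempty board whose first row is nonempty
-- and no row shorter than the first (shorter rows, [] and an empty first row make A raise IndexError).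
def Pre_removeZeroes (board : List (List Int)) : Prop :=
  board ≠ [] ∧ (board.headD []) ≠ [] ∧
    ∀ row ∈ board, (board.headD []).length ≤ row.length
instance (board : List (List Int)) : Decidable (Pre_removeZeroes board) := by
  unfold Pre_removeZeroes; infer_instance
def pvWitness_removeZeroes : List (List Int) := [[1, 0], [0, 2]]

def Spec_removeZeroes (board : List (List Int)) (out : List (List Int)) : Prop :=
  out = removeZeroes_alt board
instance (board : List (List Int)) (out : List (List Int)) : Decidable (Spec_removeZeroes board out) := by
  unfold Spec_removeZeroes; infer_instance

-- ===== CLAIM (what is proved, stated in full; the proofs are below) =====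
def Claim_equal_removeZeroes : Prop := ∀ (board : List (List Int)), Dom_removeZeroes board → Pre_removeZeroes board → Spec_removeZeroes board (removeZeroes board)

-- ===== LEMMAS AND PROOFS =====

-- proof-side vocabulary
def pvColOf (board : List (List Int)) (c : Nat) : List Int :=
  board.map (fun row => row.getD c 0)
def pvNz (l : List Int) : List Int := l.filter (fun v => decide (v ≠ 0))
def pvComp (l : List Int) : List Int :=
  List.replicate (l.length - (pvNz l).length) 0 ++ pvNz l
def pvTarget (board : List (List Int)) : List (List Int) :=
  (List.range board.length).map (fun r =>
    (List.range (board.headD []).length).map (fun c =>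
      (pvComp (pvColOf board c)).getD r 0))

lemma pv_map_range_getD {α β : Type} (l : List α) (d : α) (f : α → β) :
    (List.range l.length).map (fun i => f (l.getD i d)) = l.map f := by
  apply List.ext_getElem <;> simp
  intro i h1 h2
  rw [List.getElem?_eq_getElem h2]
  rfl

lemma pv_map_range_getD_rev {α : Type} (l : List α) (d : α) :
    (List.range l.length).map (fun j => l.getD (l.length - 1 - j) d) = l.reverse := by
  apply List.ext_getElem <;> simp
  intro j h1 h2
  rw [List.getElem?_eq_getElem (show l.length - 1 - j < l.length by omega)]
  rfl

lemma pv_foldl_snoc_counter {α : Type} (g : Nat → α) (n : Nat) :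
    (List.range n).foldl
      (fun (st : List α × Nat) _i => (st.1 ++ [g st.2], st.2 + 1)) ([], 0)
      = ((List.range n).map g, n) := by
  induction n with
  | zero => simp
  | succ n ih => rw [List.range_succ, List.foldl_append, ih]; simp

lemma pv_transposeA_eq (m : List (List Int)) :
    pvTransposeA m = (List.range (m.headD []).length).map (fun c => pvColOf m c) := by
  unfold pvTransposeA
  have hstep : (fun (st : List (List Int) × Nat) (_i : Nat) =>
      (st.1 ++ [(List.range m.length).foldl (fun r j => r ++ [(m.getD j []).getD st.2 0]) []],
       st.2 + 1))
      = fun (st : List (List Int) × Nat) (_i : Nat) => (st.1 ++ [pvColOf m st.2], st.2 + 1) := by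
    funext st i
    rw [PySem.List.foldl_append_singleton_eq_map (fun j => (m.getD j []).getD st.2 0),
        List.nil_append, pv_map_range_getD m [] (fun row => row.getD st.2 0)]
    rfl
  rw [hstep, pv_foldl_snoc_counter]

lemma pv_foldr_compact (col : List Int) :
    col.foldr (fun v (st : List Int × Nat) =>
        if v ≠ 0 then (v :: st.1, st.2) else (st.1, st.2 + 1)) ([], 0)
      = (pvNz col, col.length - (pvNz col).length) := by
  induction col with
  | nil => simp [pvNz]
  | cons v t ih =>
    have hk : (pvNz t).length ≤ t.length := List.length_filter_le _ _
    by_cases hv : v = 0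
    · subst hv
      rw [List.foldr_cons, ih, if_neg (by simp)]
      have hnz : pvNz ((0:Int) :: t) = pvNz t := by simp [pvNz]
      rw [hnz]
      simp only [Prod.mk.injEq, List.length_cons]
      exact ⟨trivial, by omega⟩
    · rw [List.foldr_cons, ih, if_pos hv]
      have hnz : pvNz (v :: t) = v :: pvNz t := by simp [pvNz, hv]
      rw [hnz]
      simp only [Prod.mk.injEq, List.length_cons]
      exact ⟨trivial, by omega⟩

lemma pv_foldl_zeros (z : Nat) (init : List Int) :
    (List.range z).foldl (fun c _k => (0:Int) :: c) init = List.replicate z 0 ++ init := by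
  induction z with
  | zero => simp
  | succ z ih => rw [List.range_succ, List.foldl_append, ih]; simp [List.replicate_succ]

lemma pv_compactA_eq (col : List Int) : pvCompactA col = pvComp col := by
  unfold pvCompactA
  have h1 : (List.range col.length).foldl
      (fun (st : List Int × Nat) j =>
        if col.getD (col.length - 1 - j) 0 ≠ 0 then
          (col.getD (col.length - 1 - j) 0 :: st.1, st.2)
        else (st.1, st.2 + 1)) ([], 0)
      = (pvNz col, col.length - (pvNz col).length) := by
    have := (List.foldl_map
      (f := fun j => col.getD (col.length - 1 - j) 0)
      (g := fun (st : List Int × Nat) v => if v ≠ 0 then (v :: st.1, st.2) else (st.1, st.2 + 1))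
      (l := List.range col.length) (init := (([] : List Int), (0:Nat)))).symm
    rw [this, pv_map_range_getD_rev col 0, List.foldl_reverse, pv_foldr_compact]
  rw [h1, pv_foldl_zeros]
  rfl

lemma pv_comp_length (l : List Int) : (pvComp l).length = l.length := by
  have hk : (pvNz l).length ≤ l.length := List.length_filter_le _ _
  simp [pvComp]
  omega

lemma pv_headD_eq_getElem {α : Type} (l : List α) (d : α) (h : 0 < l.length) :
    l.headD d = l[0] := by
  cases l with
  | nil => simp at h
  | cons a t => rfl

lemma pv_removeZeroes_eq_target (board : List (List Int))
    (hm : (board.headD []) ≠ []) :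
    removeZeroes board = pvTarget board := by
  have hm' : 0 < (board.headD []).length := List.length_pos_of_ne_nil hm
  unfold removeZeroes
  dsimp only
  rw [pv_transposeA_eq board]
  rw [PySem.List.foldl_append_singleton_eq_map
        (fun i => pvCompactA (((List.range (board.headD []).length).map
          (fun c => pvColOf board c)).getD i [])),
      List.nil_append, List.length_map, List.length_range]
  have hmap : ∀ i ∈ List.range (board.headD []).length,
      pvCompactA (((List.range (board.headD []).length).map (fun c => pvColOf board c)).getD i [])
        = pvComp (pvColOf board i) := by
    intro i hi
    rw [PySem.List.getD_map_range _ _ _ _ (List.mem_range.mp hi), pv_compactA_eq]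
  rw [List.map_congr_left hmap, pv_transposeA_eq]
  have h0 : ((List.range (board.headD []).length).map
      (fun c => pvComp (pvColOf board c))).headD [] = pvComp (pvColOf board 0) := by
    rw [pv_headD_eq_getElem _ _ (by simpa using hm'), List.getElem_map, List.getElem_range]
  rw [h0]
  have hlen : (pvComp (pvColOf board 0)).length = board.length := by
    rw [pv_comp_length]; simp [pvColOf]
  rw [hlen]
  unfold pvTarget
  refine List.map_congr_left ?_
  intro r _
  simp [pvColOf, List.map_map, Function.comp]

-- getD-level views of modify and set
lemma pv_getD_modify (l : List (List Int)) (i : Nat) (f : List Int → List Int) (r : Nat) :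
    (l.modify i f).getD r [] = if r = i ∧ r < l.length then f (l.getD r []) else l.getD r [] := by
  by_cases hr : r < l.length
  · have hl : l.getD r [] = l[r] := List.getD_eq_getElem l [] hr
    have hm : (l.modify i f).getD r [] = (l.modify i f)[r]'(by simpa using hr) :=
      List.getD_eq_getElem _ [] (by simpa using hr)
    rw [hm, List.getElem_modify, hl]
    by_cases hri : i = r
    · simp [hri, hr]
    · have hne : ¬(r = i ∧ r < l.length) := fun h => hri h.1.symm
      simp [hri, hne]
  · have h1 : (l.modify i f).getD r [] = [] :=
      List.getD_eq_default _ _ (by simpa using Nat.le_of_not_lt hr)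
    have h2 : l.getD r [] = [] := List.getD_eq_default _ _ (Nat.le_of_not_lt hr)
    rw [h1, h2]; simp [hr]

lemma pv_getD_set (row : List Int) (c : Nat) (v : Int) (cc : Nat) :
    (row.set c v).getD cc 0 = if cc = c ∧ c < row.length then v else row.getD cc 0 := by
  by_cases hc : cc < row.length
  · have h1 : (row.set c v).getD cc 0 = (row.set c v)[cc]'(by simpa using hc) :=
      List.getD_eq_getElem _ _ (by simpa using hc)
    rw [h1]
    by_cases h : cc = c
    · subst h; rw [List.getElem_set_self]; simp [hc]
    · rw [List.getElem_set_ne (fun he => h he.symm)]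
      rw [show row.getD cc 0 = row[cc] from List.getD_eq_getElem row 0 hc]
      simp [h]
  · have h1 := List.getD_eq_default (row.set c v) (0:Int) (by simpa using Nat.le_of_not_lt hc)
    have h2 := List.getD_eq_default row (0:Int) (Nat.le_of_not_lt hc)
    rw [h1, h2]
    have hne : ¬(cc = c ∧ c < row.length) := by rintro ⟨rfl, h⟩; exact hc h
    simp [hne]

def pvWriteFoldr (c : Nat) (l : List Int) (M : List (List Int)) (w : Nat) :
    List (List Int) × Nat :=
  l.foldr (fun v st => if v ≠ 0 then (st.1.modify st.2 (fun row => row.set c v), st.2 - 1) else st)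
    (M, w)

lemma pv_writeFoldr_char (c : Nat) (l : List Int) (M : List (List Int)) (w : Nat)
    (hk : (pvNz l).length ≤ w + 1) :
    (pvWriteFoldr c l M w).2 = w - (pvNz l).length ∧
    (pvWriteFoldr c l M w).1.length = M.length ∧
    (∀ r, ((pvWriteFoldr c l M w).1.getD r []).length = (M.getD r []).length) ∧
    (∀ r cc, ((pvWriteFoldr c l M w).1.getD r []).getD cc 0 =
       if cc = c ∧ w + 1 - (pvNz l).length ≤ r ∧ r ≤ w ∧ r < M.length ∧ c < (M.getD r []).length
       then (pvNz l).getD (r - (w + 1 - (pvNz l).length)) 0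
       else (M.getD r []).getD cc 0) := by
  induction l with
  | nil =>
    refine ⟨by simp [pvWriteFoldr, pvNz], by simp [pvWriteFoldr], fun r => by simp [pvWriteFoldr], ?_⟩
    intro r cc
    rw [if_neg]
    · simp [pvWriteFoldr]
    · rintro ⟨-, h1, h2, -⟩
      simp [pvNz] at h1
      omega
  | cons v t ih =>
    have hkt : (pvNz t).length ≤ (pvNz (v :: t)).length := by
      simp only [pvNz, List.filter_cons]
      split <;> simp
    obtain ⟨ih1, ih2, ih3, ih4⟩ := ih (le_trans hkt hk)
    by_cases hv : v = 0
    · have hstep : pvWriteFoldr c (v :: t) M w = pvWriteFoldr c t M w := by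
        simp only [pvWriteFoldr, List.foldr_cons]
        rw [if_neg (by simp [hv])]
      have hnz : pvNz (v :: t) = pvNz t := by simp [pvNz, hv]
      rw [hstep, hnz]
      exact ⟨ih1, ih2, ih3, ih4⟩
    · have hnz : pvNz (v :: t) = v :: pvNz t := by simp [pvNz, hv]
      have hk'w : (pvNz t).length ≤ w := by rw [hnz] at hk; simp at hk; omega
      set P := pvWriteFoldr c t M w with hP
      have hstep : pvWriteFoldr c (v :: t) M w
          = (P.1.modify P.2 (fun row => row.set c v), P.2 - 1) := by
        simp only [pvWriteFoldr, List.foldr_cons]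
        rw [if_pos hv]
        rfl
      rw [hstep, hnz]

      set k' := (pvNz t).length with hk'
      refine ⟨?_, ?_, ?_, ?_⟩
      · simp only [List.length_cons]
        omega
      · simp only [List.length_modify]
        exact ih2
      · intro r
        simp only
        rw [pv_getD_modify]
        split_ifs with h
        · rw [List.length_set]
          exact ih3 r
        · exact ih3 r
      · intro r cc
        simp only [List.length_cons]
        rw [pv_getD_modify]
        by_cases hrp : r = P.2 ∧ r < P.1.length
        · rw [if_pos hrp]
          rw [pv_getD_set]
          have hrowlen : (P.1.getD r []).length = (M.getD r []).length := ih3 r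
          have hrM : r < M.length := by rw [← ih2]; exact hrp.2
          have hrp2 : r = w - k' := by rw [hrp.1, ih1]
          by_cases hcc : cc = c ∧ c < (P.1.getD r []).length
          · rw [if_pos hcc,
                if_pos ⟨hcc.1, by omega, by omega, hrM, by rw [← hrowlen]; exact hcc.2⟩]
            have hidx : r - (w + 1 - (k' + 1)) = 0 := by omega
            rw [hidx, List.getD_cons_zero]
          · rw [if_neg hcc, ih4 r cc, if_neg (by rintro ⟨-, h1, -⟩; omega), if_neg ?neg2]
            case neg2 =>
              rintro ⟨hc1, -, -, -, hc2⟩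
              exact hcc ⟨hc1, by rw [hrowlen]; exact hc2⟩
        · rw [if_neg hrp, ih4 r cc]
          by_cases hA : cc = c ∧ w + 1 - k' ≤ r ∧ r ≤ w ∧ r < M.length ∧ c < (M.getD r []).length
          · rw [if_pos hA,
                if_pos ⟨hA.1, by omega, hA.2.2.1, hA.2.2.2.1, hA.2.2.2.2⟩]
            have hidx : r - (w + 1 - (k' + 1)) = (r - (w + 1 - k')) + 1 := by omega
            rw [hidx, List.getD_cons_succ]
          · rw [if_neg hA, if_neg ?neg3]
            case neg3 =>
              rintro ⟨hc1, hc2, hc3, hc4, hc5⟩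
              have hr1 : r = w - k' := by
                by_cases h : w + 1 - k' ≤ r
                · exact absurd ⟨hc1, h, hc3, hc4, hc5⟩ hA
                · omega
              exact hrp ⟨by rw [hr1, ih1], by rw [ih2]; exact hc4⟩

lemma pv_colOf_getD (board : List (List Int)) (c r : Nat) (hr : r < board.length) :
    (pvColOf board c).getD r 0 = (board.getD r []).getD c 0 := by
  have hr' : r < (pvColOf board c).length := by simpa [pvColOf] using hr
  rw [List.getD_eq_getElem _ _ hr']
  unfold pvColOf
  rw [List.getElem_map, List.getD_eq_getElem board [] hr]

lemma pv_fillColB_eq (board : List (List Int)) (c : Nat) (result : List (List Int)) :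
    pvFillColB board board.length c result
      = (pvWriteFoldr c (pvColOf board c) result (board.length - 1)).1 := by
  rcases board with _ | ⟨h0, t0⟩
  · simp [pvFillColB, pvWriteFoldr, pvColOf]
  set board := h0 :: t0 with hb
  have hn : 0 < board.length := by simp [hb]
  have hlen : (pvColOf board c).length = board.length := by simp [pvColOf]
  unfold pvFillColB pvWriteFoldr
  rw [PySem.List.foldl_congr_mem _ _
      (fun (st : List (List Int) × Nat) t =>
        if (pvColOf board c).getD (board.length - 1 - t) 0 ≠ 0 then
          (st.1.modify st.2
            (fun row => row.set c ((pvColOf board c).getD (board.length - 1 - t) 0)), st.2 - 1)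
        else st) _ ?hcong]
  case hcong =>
    intro acc t ht
    have ht' : board.length - 1 - t < board.length := by
      have := List.mem_range.mp ht
      omega
    dsimp only
    rw [pv_colOf_getD board c _ ht']
  rw [← List.foldl_map (f := fun t => (pvColOf board c).getD (board.length - 1 - t) 0)
        (g := fun (st : List (List Int) × Nat) v =>
          if v ≠ 0 then (st.1.modify st.2 (fun row => row.set c v), st.2 - 1) else st)]
  rw [show (List.range board.length).map
        (fun t => (pvColOf board c).getD (board.length - 1 - t) 0)
        = (pvColOf board c).reverse from by rw [← hlen]; exact pv_map_range_getD_rev _ _]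
  rw [List.foldl_reverse]

def pvAltPartial (board : List (List Int)) (p : Nat) : List (List Int) :=
  (List.range p).foldl (fun result c => pvFillColB board board.length c result)
    (List.replicate board.length (List.replicate (board.headD []).length (0:Int)))

lemma pv_comp_explicit (board : List (List Int)) (p : Nat) :
    pvComp (pvColOf board p)
      = List.replicate (board.length - (pvNz (pvColOf board p)).length) 0
          ++ pvNz (pvColOf board p) := by
  unfold pvComp
  have : (pvColOf board p).length = board.length := by simp [pvColOf]
  rw [this]

lemma pv_init_row (n m r : Nat) :
    ((List.replicate n (List.replicate m (0:Int))).getD r [])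
      = if r < n then List.replicate m 0 else [] := by
  by_cases hr : r < n
  · rw [if_pos hr, List.getD_eq_getElem _ _ (by simpa using hr), List.getElem_replicate]
  · rw [if_neg hr, List.getD_eq_default _ _ (by simpa using Nat.le_of_not_lt hr)]

lemma pv_alt_inv (board : List (List Int)) (hn : board ≠ []) (p : Nat)
    (hp : p ≤ (board.headD []).length) :
    (pvAltPartial board p).length = board.length ∧
    (∀ r, ((pvAltPartial board p).getD r []).length
        = if r < board.length then (board.headD []).length else 0) ∧
    (∀ r cc, (((pvAltPartial board p).getD r []).getD cc 0)
        = if cc < p ∧ r < board.length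
          then (pvComp (pvColOf board cc)).getD r 0 else 0) := by
  have hn1 : 0 < board.length := List.length_pos_of_ne_nil hn
  induction p with
  | zero =>
    refine ⟨by simp [pvAltPartial], ?_, ?_⟩
    · intro r
      unfold pvAltPartial
      simp only [List.range_zero, List.foldl_nil]
      rw [pv_init_row]
      split_ifs
      · simp
      · rfl
    · intro r cc
      rw [if_neg (by rintro ⟨h, -⟩; omega)]
      unfold pvAltPartial
      simp only [List.range_zero, List.foldl_nil]
      rw [pv_init_row]
      split_ifs with hr
      · by_cases hc : cc < (board.headD []).length
        · rw [List.getD_replicate _ hc]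
        · rw [List.getD_eq_default _ _ (by simpa using Nat.le_of_not_lt hc)]
      · rfl
  | succ p ih =>
    obtain ⟨ih1, ih2, ih3⟩ := ih (by omega)
    have hstep : pvAltPartial board (p + 1)
        = pvFillColB board board.length p (pvAltPartial board p) := by
      unfold pvAltPartial
      rw [List.range_succ, List.foldl_append, List.foldl_cons, List.foldl_nil]
    rw [hstep, pv_fillColB_eq]
    have hcol_len : (pvColOf board p).length = board.length := by simp [pvColOf]
    have hkn : (pvNz (pvColOf board p)).length ≤ board.length := by
      rw [← hcol_len]; exact List.length_filter_le _ _
    have hk : (pvNz (pvColOf board p)).length ≤ board.length - 1 + 1 := by omega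
    obtain ⟨ch1, ch2, ch3, ch4⟩ :=
      pv_writeFoldr_char p (pvColOf board p) (pvAltPartial board p) (board.length - 1) hk
    refine ⟨by rw [ch2, ih1], fun r => by rw [ch3 r]; exact ih2 r, ?_⟩
    intro r cc
    rw [ch4 r cc]
    set k := (pvNz (pvColOf board p)).length with hkdef
    by_cases hcond : cc = p ∧ board.length - 1 + 1 - k ≤ r ∧ r ≤ board.length - 1 ∧
        r < (pvAltPartial board p).length ∧ p < ((pvAltPartial board p).getD r []).length
    · rw [if_pos hcond]
      have hrn : r < board.length := by rw [← ih1]; exact hcond.2.2.2.1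
      rw [if_pos ⟨by omega, hrn⟩, hcond.1, pv_comp_explicit,
          List.getD_append_right _ _ _ _ (by simp; omega)]
      simp only [List.length_replicate]
      congr 1
      omega
    · rw [if_neg hcond, ih3 r cc]
      by_cases hB : cc < p + 1 ∧ r < board.length
      · by_cases hcp : cc < p
        · rw [if_pos ⟨hcp, hB.2⟩, if_pos hB]
      
        · have hccp : cc = p := by omega
          have hreg : r < board.length - k := by
            by_contra hcontra
            apply hcond
            refine ⟨hccp, by omega, by omega, by rw [ih1]; exact hB.2, ?_⟩
            rw [ih2 r, if_pos hB.2]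
            omega
          rw [if_neg (by rintro ⟨h1, -⟩; omega), if_pos hB, hccp, pv_comp_explicit,
              List.getD_append _ _ _ _ (by simp; omega),
              List.getD_replicate _ (by omega)]
      · rw [if_neg hB, if_neg (by rintro ⟨h1, h2⟩; exact hB ⟨by omega, h2⟩)]

lemma pv_alt_eq_target (board : List (List Int)) (hn : board ≠ []) :
    removeZeroes_alt board = pvTarget board := by
  have hn1 : 0 < board.length := List.length_pos_of_ne_nil hn
  have halt : removeZeroes_alt board = pvAltPartial board (board.headD []).length := rfl
  obtain ⟨h1, h2, h3⟩ := pv_alt_inv board hn (board.headD []).length le_rfl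
  rw [halt]
  apply List.ext_getElem
  · rw [h1]; simp [pvTarget]
  · intro r hr1 hr2
    have hrn : r < board.length := by rw [← h1]; exact hr1
    have htrow : (pvTarget board)[r]
        = (List.range (board.headD []).length).map
            (fun c => (pvComp (pvColOf board c)).getD r 0) := by
      unfold pvTarget
      rw [List.getElem_map, List.getElem_range]
    apply List.ext_getElem
    · rw [htrow]
      have := h2 r
      rw [if_pos hrn] at this
      rw [← List.getD_eq_getElem _ [] hr1, this]
      simp
    · intro cc hc1 hc2
      have hrowlen : ((pvAltPartial board (board.headD []).length)[r]).length
          = (board.headD []).length := by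
        rw [← List.getD_eq_getElem _ [] hr1]
        rw [h2 r, if_pos hrn]
      have hcm : cc < (board.headD []).length := by rw [← hrowlen]; exact hc1
      have hL : ((pvAltPartial board (board.headD []).length)[r])[cc]
          = (((pvAltPartial board (board.headD []).length).getD r []).getD cc 0) := by
        rw [List.getD_eq_getElem _ [] hr1, List.getD_eq_getElem _ 0 hc1]
      rw [hL, h3 r cc, if_pos ⟨hcm, hrn⟩, ← List.getD_eq_getElem _ 0 hc2, htrow]
      rw [PySem.List.getD_map_range _ _ _ _ hcm]

-- ===== VERDICT (by name: the statement is the Claim_ definition above) =====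
theorem removeZeroes_spec : Claim_equal_removeZeroes := by
  intro board _hdom hpre
  unfold Spec_removeZeroes
  rw [pv_removeZeroes_eq_target board hpre.2.1, pv_alt_eq_target board hpre.1]
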